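-- pv_equiv track=rewrite | github.com/Frigon-e/certCheck | webscraper.py | newest_Cert
-- ===== SOURCE A (Python) =====
-- def newest_Cert(certs, dates, certName):
--     # Makes list of where dates of same cert are
--     indices = [i for i, x in enumerate(certs) if certName in x]
--     # returns min date of indices
--     if len(indices) > 1:
--         newDates = [dates[x] for x in indices]
--         return min(newDates)
--     elif len(indices) == 1:
--         return dates[indices[0]]
--     else:
--         return None
-- ===== SOURCE B (Python) =====
-- def newest_Cert(certs, dates, certName):
--     # Sort-then-pick: gather the matching dates in one fused comprehension,
--     # order them, and take the first; no index list, no count branching, no min().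
--     matched = sorted(dates[i] for i, c in enumerate(certs) if certName in c)
--     return matched[0] if matched else None
-- ===== Notes on version B (the rewrite author's own statement) =====
-- stated objective: simpler
-- what changed: Replaced A's build-an-index-list, rebuild-a-date-list, branch-on-count and min() with one fused comprehension of the matching dates followed by sorting and taking the first element.
import Mathlib
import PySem

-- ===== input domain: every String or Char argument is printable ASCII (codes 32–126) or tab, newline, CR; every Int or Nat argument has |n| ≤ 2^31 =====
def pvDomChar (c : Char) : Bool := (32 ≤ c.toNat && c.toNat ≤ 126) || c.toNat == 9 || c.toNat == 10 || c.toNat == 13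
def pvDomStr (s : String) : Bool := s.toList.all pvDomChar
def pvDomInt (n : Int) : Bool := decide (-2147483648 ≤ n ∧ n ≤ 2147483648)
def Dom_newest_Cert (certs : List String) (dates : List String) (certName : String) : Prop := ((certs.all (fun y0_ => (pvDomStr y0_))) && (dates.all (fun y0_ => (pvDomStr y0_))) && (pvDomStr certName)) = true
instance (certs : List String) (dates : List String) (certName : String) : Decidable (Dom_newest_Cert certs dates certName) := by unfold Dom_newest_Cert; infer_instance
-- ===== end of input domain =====

-- B replaces A's index-list + date-list + branch-on-count + min() with one fused
-- comprehension of the matching dates, sorted, taking the first (objective: simpler).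


-- ===== PORT A =====
-- indices = [i for i, x in enumerate(certs) if certName in x]; then branch on len(indices):
-- >1: min of the gathered dates; ==1: dates[indices[0]]; else None.
-- dates[...] is in range by Pre_, so pyGetD with a dummy default is exact here.
def newest_Cert (certs : List String) (dates : List String) (certName : String) : Option String :=
  let indices := ((PySem.List.enumerate certs).filter (fun p => PySem.Str.isIn certName p.2)).map (fun p => p.1)
  if 1 < indices.length then
    let newDates := indices.map (fun x => PySem.List.pyGetD dates x "")
    PySem.List.min? newDates (fun s => s)
  else if indices.length = 1 then
    some (PySem.List.pyGetD dates (PySem.List.pyGetD indices 0 0) "")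
  else
    none

-- ===== PORT B =====
-- matched = sorted(dates[i] for i, c in enumerate(certs) if certName in c)
-- return matched[0] if matched else None
def newest_Cert_alt (certs : List String) (dates : List String) (certName : String) : Option String :=
  let matched := PySem.List.sorted
    (((PySem.List.enumerate certs).filter (fun p => PySem.Str.isIn certName p.2)).map
      (fun p => PySem.List.pyGetD dates p.1 ""))
    (fun s => s) false
  match matched with
  | [] => none
  | m :: _ => some m

-- ===== PRECONDITION & SPEC =====
-- Pre_ excludes exactly the inputs where Python A raises IndexError: a cert matching
-- certName whose index is not a valid index into dates (B raises there too).
def Pre_newest_Cert (certs : List String) (dates : List String) (certName : String) : Prop :=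
  ∀ k : Nat, (h : k < certs.length) → PySem.Str.isIn certName certs[k] = true → k < dates.length
instance (certs : List String) (dates : List String) (certName : String) : Decidable (Pre_newest_Cert certs dates certName) := by unfold Pre_newest_Cert; infer_instance
def pvWitness_newest_Cert : List String × List String × String := (["abc", "xyz"], ["2020", "2021"], "b")

def Spec_newest_Cert (certs : List String) (dates : List String) (certName : String) (out : Option String) : Prop := out = newest_Cert_alt certs dates certName
instance (certs : List String) (dates : List String) (certName : String) (out : Option String) : Decidable (Spec_newest_Cert certs dates certName out) := by unfold Spec_newest_Cert; infer_instance

-- ===== CLAIM (what is proved, stated in full; the proofs are below) =====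
def Claim_equal_newest_Cert : Prop := ∀ (certs : List String) (dates : List String) (certName : String), Dom_newest_Cert certs dates certName → Pre_newest_Cert certs dates certName → Spec_newest_Cert certs dates certName (newest_Cert certs dates certName)

-- ===== LEMMAS AND PROOFS =====

-- head of sorted (id key, ascending) is min? (they agree on values; ties are equal strings)
lemma head_sorted_eq_min? (l : List String) :
    (match PySem.List.sorted l (fun s => s) false with
     | [] => (none : Option String)
     | m :: _ => some m) = PySem.List.min? l (fun s => s) := by
  rcases hs : PySem.List.sorted l (fun s => s) false with _ | ⟨m, t⟩
  · have hl : l = [] := (PySem.List.sorted_eq_nil_iff l (fun s => s) false).mp hs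
    subst hl
    simp [PySem.List.min?]
  · have hm : m ∈ l := by
      have : m ∈ PySem.List.sorted l (fun s => s) false := by rw [hs]; exact List.mem_cons_self
      exact (PySem.List.mem_sorted l (fun s => s) false m).mp this
    have hlow : ∀ y ∈ l, m ≤ y := PySem.List.key_head_sorted_le l (fun s => s) hs
    rcases hmin : PySem.List.min? l (fun s => s) with _ | mn
    · exact absurd ((PySem.List.min?_eq_none_iff l (fun s => s)).mp hmin ▸ hm) (List.not_mem_nil)
    · have hmn : mn ∈ l := PySem.List.min?_mem hmin
      have h1 : mn ≤ m := PySem.List.min?_isMin hmin m hm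
      have h2 : m ≤ mn := hlow mn hmn
      simp [le_antisymm h2 h1]

-- ===== VERDICT (by name: the statement is the Claim_ definition above) =====
theorem newest_Cert_spec : Claim_equal_newest_Cert := by
  intro certs dates certName _ _
  unfold Spec_newest_Cert newest_Cert newest_Cert_alt
  dsimp only
  set F := (PySem.List.enumerate certs).filter (fun p => PySem.Str.isIn certName p.2) with hF
  rcases hFc : F with _ | ⟨p, _ | ⟨q, t⟩⟩
  · simp [PySem.List.sorted]
  · -- exactly one match: A returns dates[indices[0]]
    simp [PySem.List.pyGetD_zero_cons, PySem.List.sorted, PySem.List.insertBy]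
  · -- two or more matches: A's min over the date list = head of B's sorted date list
    rw [if_pos (by simp), List.map_map]
    simp only [Function.comp_def]
    exact (head_sorted_eq_min? ((p :: q :: t).map (fun p => PySem.List.pyGetD dates p.1 ""))).symm
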